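-- pv_equiv track=rewrite | github.com/MahdiBaghbani/Python-Encryption | source/lib/FrequencyAnalyzer.py | get_word_order
-- ===== SOURCE A (Python) =====
-- import operator
-- from collections import defaultdict
--
-- def get_word_order(word_list: list, length: int) -> list:
--     """
--     This function will return a frequency ordered list of words with specific length
--
--     :param word_list: list of words
--     :param length: length of target words
--     :return: frequency ordered list of words with specific length
--     """
--
--     # check inputs
--     if not type(word_list) == list:
--         raise TypeError("Argument 'word_list' of this function must be of type list.\n")
--     if not type(length) == int:
--         raise TypeError("Argument 'length' of this function must be of type integer.\n")
--
--     # create a default dict with values of type int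
--     dictionary = defaultdict(int)
--     # for word in word_list if the words length is the one we are searching for,
--     # add the word as key to dictionary and add 1 to in's value as counter
--     for i in word_list:
--         if len(i) == length:
--             dictionary[i] += 1
--     # convert default dict to dict
--     dictionary = dict(dictionary)
--     # sort all words in dictionary based on their counters, reverse true means
--     # the words with higher counter numbers will be at start of list
--     dictionary = sorted(dictionary.items(), key=operator.itemgetter(1), reverse=True)
--     # return frequency ordered words in a list
--     return [get_item_at_index_zero(i) for i in dictionary]
--
-- def get_item_at_index_zero(x):
--     """ Returns item at index zero """
--     return x[0]
-- ===== SOURCE B (Python) =====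
-- def get_word_order(word_list: list, length: int) -> list:
--     """Frequency-ordered list of the words of the given length (bucket sort by count)."""
--
--     # check inputs
--     if not type(word_list) == list:
--         raise TypeError("Argument 'word_list' of this function must be of type list.\n")
--     if not type(length) == int:
--         raise TypeError("Argument 'length' of this function must be of type integer.\n")
--
--     # count the words of the requested length, first occurrence fixes the order
--     counts = {}
--     for word in word_list:
--         if len(word) == length:
--             counts[word] = counts.get(word, 0) + 1
--     if not counts:
--         return []
--     # bucket the words by their count, then emit buckets from highest count down
--     highest = max(counts.values())
--     buckets = [[] for _ in range(highest + 1)]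
--     for word, count in counts.items():
--         buckets[count].append(word)
--     result = []
--     for count in range(highest, 0, -1):
--         result.extend(buckets[count])
--     return result
-- ===== Notes on version B (the rewrite author's own statement) =====
-- stated objective: alternative
-- what changed: Replaces the comparison sort of the (word, count) items by a counting/bucket sort: words are bucketed by their frequency in dict insertion order and the buckets are concatenated from the highest count down, with an explicit empty-result guard.
import Mathlib
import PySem

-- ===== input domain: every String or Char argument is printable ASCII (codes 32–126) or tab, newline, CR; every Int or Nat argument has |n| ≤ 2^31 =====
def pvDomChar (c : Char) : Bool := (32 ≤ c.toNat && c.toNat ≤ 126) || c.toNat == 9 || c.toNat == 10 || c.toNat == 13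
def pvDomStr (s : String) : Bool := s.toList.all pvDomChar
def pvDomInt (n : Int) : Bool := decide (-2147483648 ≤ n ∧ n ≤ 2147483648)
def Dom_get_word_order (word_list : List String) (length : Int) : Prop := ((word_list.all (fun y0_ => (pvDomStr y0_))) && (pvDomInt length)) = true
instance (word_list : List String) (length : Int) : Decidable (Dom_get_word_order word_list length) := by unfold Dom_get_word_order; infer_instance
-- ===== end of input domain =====

-- B replaces A's comparison sort of the count dict by a counting/bucket sort over the
-- integer frequencies (buckets filled in dict insertion order, emitted from the highest
-- count down), an alternative of the same practical cost.

-- ===== PORT A =====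
def get_item_at_index_zero (x : String × Int) : String := x.1

def get_word_order (word_list : List String) (length : Int) : List String :=
  let dictionary : PySem.Dict String Int :=
    word_list.foldl (fun d i =>
      if PySem.Str.len i = length then d.modify i 0 (fun x => x + 1) else d)
      PySem.Dict.empty
  let sortedItems := PySem.List.sorted dictionary.items (fun p => p.2) true
  sortedItems.map (fun i => get_item_at_index_zero i)

-- ===== PORT B =====
def get_word_order_alt (word_list : List String) (length : Int) : List String :=
  let counts : PySem.Dict String Int :=
    word_list.foldl (fun d word =>
      if PySem.Str.len word = length then d.insert word (d.getD word 0 + 1) else d)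
      PySem.Dict.empty
  if counts.items.isEmpty then []
  else
    let highest := (PySem.List.max? counts.values (fun v => v)).getD 0
    let buckets :=
      counts.items.foldl
        (fun bs p => PySem.List.pySetD bs p.2 (PySem.List.pyGetD bs p.2 [] ++ [p.1]))
        ((PySem.List.pyRange 0 (highest + 1) 1).map (fun _ => ([] : List String)))
    (PySem.List.pyRange highest 0 (-1)).foldl
      (fun acc c => acc ++ PySem.List.pyGetD buckets c []) []

-- ===== PRECONDITION & SPEC =====
def Spec_get_word_order (word_list : List String) (length : Int) (out : List String) : Prop := out = get_word_order_alt word_list length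
instance (word_list : List String) (length : Int) (out : List String) : Decidable (Spec_get_word_order word_list length out) := by unfold Spec_get_word_order; infer_instance

-- ===== CLAIM (what is proved, stated in full; the proofs are below) =====
def Claim_equal_get_word_order : Prop := ∀ (word_list : List String) (length : Int), Dom_get_word_order word_list length → Spec_get_word_order word_list length (get_word_order word_list length)

-- ===== LEMMAS AND PROOFS =====

-- a foldl whose step is guarded by `if p x` is the unguarded foldl over the filtered list
theorem pv_foldl_if_filter {α β : Type} (p : α → Prop) [DecidablePred p]
    (f : β → α → β) (l : List α) (a : β) :
    l.foldl (fun acc x => if p x then f acc x else acc) a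
      = (l.filter (fun x => decide (p x))).foldl f a := by
  induction l generalizing a with
  | nil => rfl
  | cons x t ih =>
    by_cases h : p x <;> simp [h, ih]

theorem pv_insertBy_append_left {α : Type} (bef : α → α → Bool) (x : α) (L1 L2 : List α)
    (h : ∀ y ∈ L1, bef x y = false) :
    PySem.List.insertBy bef x (L1 ++ L2) = L1 ++ PySem.List.insertBy bef x L2 := by
  induction L1 with
  | nil => rfl
  | cons y t ih =>
    have hy : bef x y = false := h y (by simp)
    simp [PySem.List.insertBy, hy, ih (fun z hz => h z (by simp [hz]))]

theorem pv_insertBy_all_before {α : Type} (bef : α → α → Bool) (x : α) (L : List α)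
    (h : ∀ y ∈ L, bef x y = true) :
    PySem.List.insertBy bef x L = x :: L := by
  cases L with
  | nil => rfl
  | cons y t => simp [PySem.List.insertBy, h y (by simp)]

theorem pv_insert_step {α : Type} (key : α → Int) (x : α) :
    ∀ (K : List Int), K.Pairwise (· > ·) → key x ∈ K → ∀ (ys : List α),
    PySem.List.insertBy (fun a b => decide (key b < key a)) x
        (K.flatMap (fun c => ys.filter (fun y => key y = c)))
      = K.flatMap (fun c => (ys ++ [x]).filter (fun y => key y = c)) := by
  intro K
  induction K with
  | nil => intro _ hx; simp at hx
  | cons c K' ih =>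
    intro hP hx ys
    have hlt : ∀ c' ∈ K', c' < c := by
      intro c' hc'; exact (List.pairwise_cons.mp hP).1 c' hc'
    rw [List.flatMap_cons, List.flatMap_cons]
    by_cases hxc : key x = c
    · -- x belongs to the first bucket; it goes to the end of that bucket
      have h1 : ∀ y ∈ ys.filter (fun y => key y = c), (fun a b => decide (key b < key a)) x y = false := by
        intro y hy
        have := (List.mem_filter.mp hy).2
        simp_all
      have h2 : ∀ y ∈ K'.flatMap (fun c => ys.filter (fun y => key y = c)),
          (fun a b => decide (key b < key a)) x y = true := by
        intro y hy
        obtain ⟨c', hc', hy'⟩ := List.mem_flatMap.mp hy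
        have hk : key y = c' := by
          have := (List.mem_filter.mp hy').2; simp_all
        have := hlt c' hc'
        simp only [decide_eq_true_eq]; omega
      rw [pv_insertBy_append_left _ _ _ _ h1, pv_insertBy_all_before _ _ _ h2]
      have hrest : K'.flatMap (fun c => (ys ++ [x]).filter (fun y => key y = c))
          = K'.flatMap (fun c => ys.filter (fun y => key y = c)) := by
        apply List.flatMap_congr
        intro c' hc'
        have hne : key x ≠ c' := by have := hlt c' hc'; omega
        simp [List.filter_append, hne]
      rw [hrest, List.filter_append]
      simp [hxc]
    · -- x belongs to a later bucket
      have hx' : key x ∈ K' := by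
        rcases List.mem_cons.mp hx with h | h
        · exact absurd h hxc
        · exact h
      have h1 : ∀ y ∈ ys.filter (fun y => key y = c), (fun a b => decide (key b < key a)) x y = false := by
        intro y hy
        have hk : key y = c := by have := (List.mem_filter.mp hy).2; simp_all
        have : key x < c := hlt _ hx'
        simp only [decide_eq_false_iff_not]; omega
      rw [pv_insertBy_append_left _ _ _ _ h1, ih (List.pairwise_cons.mp hP).2 hx' ys]
      have : (ys ++ [x]).filter (fun y => key y = c) = ys.filter (fun y => key y = c) := by
        simp [List.filter_append, hxc]
      rw [this]

theorem pv_sorted_foldl_aux {α : Type} (key : α → Int) (K : List Int) (hP : K.Pairwise (· > ·)) :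
    ∀ (xs ys : List α), (∀ x ∈ xs, key x ∈ K) →
    xs.foldl (fun acc x => PySem.List.insertBy (fun a b => decide (key b < key a)) x acc)
        (K.flatMap (fun c => ys.filter (fun y => key y = c)))
      = K.flatMap (fun c => (ys ++ xs).filter (fun y => key y = c)) := by
  intro xs
  induction xs with
  | nil => intro ys _; simp
  | cons x t ih =>
    intro ys hmem
    rw [List.foldl_cons, pv_insert_step key x K hP (hmem x (by simp)) ys]
    have := ih (ys ++ [x]) (fun z hz => hmem z (by simp [hz]))
    simpa using this

-- Python's stable reverse sort by an Int key is the concatenation of the key-buckets,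
-- taken along any strictly decreasing list K covering all keys
theorem pv_sortedRev_eq_flatMap {α : Type} (key : α → Int) (K : List Int)
    (hP : K.Pairwise (· > ·)) (xs : List α) (hmem : ∀ x ∈ xs, key x ∈ K) :
    PySem.List.sorted xs key true = K.flatMap (fun c => xs.filter (fun y => key y = c)) := by
  rw [PySem.List.sorted_rev_eq_foldl_insertBy]
  have h := pv_sorted_foldl_aux key K hP xs [] hmem
  have h0 : K.flatMap (fun c => List.filter (fun y => decide (key y = c)) ([] : List α)) = [] := by
    simp
  rw [h0] at h
  simpa using h

theorem pv_pySetD_int {α : Type} (xs : List α) (i : Int) (v : α)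
    (h0 : 0 ≤ i) (h1 : i < (xs.length : Int)) :
    PySem.List.pySetD xs i v = xs.set i.toNat v := by
  simp [PySem.List.pySetD, PySem.List.pySet?, PySem.List.pyIdx?, h0, h1]

-- the bucket-filling loop: bucket c collects, in order, the first components of the
-- pairs whose second component is c
theorem pv_buckets_foldl (items : List (String × Int)) :
    ∀ (bs : List (List String)),
    (∀ p ∈ items, 0 ≤ p.2 ∧ p.2 < (bs.length : Int)) →
    (items.foldl (fun bs p => PySem.List.pySetD bs p.2 (PySem.List.pyGetD bs p.2 [] ++ [p.1])) bs).length = bs.length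
    ∧ ∀ c : Int, 0 ≤ c → c < (bs.length : Int) →
      PySem.List.pyGetD (items.foldl (fun bs p => PySem.List.pySetD bs p.2 (PySem.List.pyGetD bs p.2 [] ++ [p.1])) bs) c []
        = PySem.List.pyGetD bs c [] ++ (items.filter (fun p => p.2 = c)).map (·.1) := by
  induction items with
  | nil => intro bs _; simp
  | cons p t ih =>
    intro bs hin
    have hp := hin p (by simp)
    have hset : PySem.List.pySetD bs p.2 (PySem.List.pyGetD bs p.2 [] ++ [p.1])
        = bs.set p.2.toNat (PySem.List.pyGetD bs p.2 [] ++ [p.1]) :=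
      pv_pySetD_int bs p.2 _ hp.1 hp.2
    have hlen1 : (bs.set p.2.toNat (PySem.List.pyGetD bs p.2 [] ++ [p.1])).length = bs.length := by
      simp
    have ht : ∀ q ∈ t, 0 ≤ q.2 ∧ q.2 < ((bs.set p.2.toNat (PySem.List.pyGetD bs p.2 [] ++ [p.1])).length : Int) := by
      intro q hq; rw [hlen1]; exact hin q (by simp [hq])
    obtain ⟨ihl, ihg⟩ := ih _ ht
    constructor
    · simp only [List.foldl_cons, hset]; rw [ihl, hlen1]
    · intro c hc0 hc1
      simp only [List.foldl_cons, hset]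
      rw [ihg c hc0 (by rw [hlen1]; exact hc1)]
      have hc1' : c < ((bs.set p.2.toNat (PySem.List.pyGetD bs p.2 [] ++ [p.1])).length : Int) := by
        rw [hlen1]; exact hc1
      have hgl : PySem.List.pyGetD (bs.set p.2.toNat (PySem.List.pyGetD bs p.2 [] ++ [p.1])) c []
          = if p.2 = c then PySem.List.pyGetD bs c [] ++ [p.1] else PySem.List.pyGetD bs c [] := by
        by_cases h : p.2 = c
        · subst h
          rw [if_pos rfl, PySem.List.pyGetD_eq_getElem _ _ hc0 hc1']
          rw [List.getElem_set]
          simp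
        · rw [if_neg h, PySem.List.pyGetD_eq_getElem _ _ hc0 hc1']
          rw [List.getElem_set, if_neg (by omega)]
          rw [PySem.List.pyGetD_eq_getElem bs _ hc0 hc1]
      rw [hgl]
      by_cases h : p.2 = c <;> simp [h]

theorem pv_pyRange_down (m : Int) :
    PySem.List.pyRange m 0 (-1) = (List.range m.toNat).map (fun k : Nat => m - (k : Int)) := by
  simp only [PySem.List.pyRange]
  rw [if_neg (by norm_num), if_neg (by norm_num)]
  by_cases h : (0 : Int) < m
  · rw [if_pos h]
    have hc : ((m - 0 + -(-1) - 1) / -(-1)).toNat = m.toNat := by norm_num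
    rw [hc]
    apply List.map_congr_left
    intro k _; ring
  · rw [if_neg h]
    have h0 : m.toNat = 0 := by omega
    simp [h0]

-- ===== VERDICT helper: the main equivalence =====
theorem pv_main (word_list : List String) (length : Int) :
    get_word_order word_list length = get_word_order_alt word_list length := by
  unfold get_word_order get_word_order_alt
  simp only []
  -- both loops build the counter of the filtered word list
  have e1 : word_list.foldl (fun d i => if PySem.Str.len i = length then d.modify i 0 (fun x => x + 1) else d) (PySem.Dict.empty : PySem.Dict String Int)
      = (word_list.filter (fun w => decide (PySem.Str.len w = length))).foldl (fun d i => d.modify i 0 (fun x => x + 1)) PySem.Dict.empty :=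
    pv_foldl_if_filter _ _ _ _
  have e2 : word_list.foldl (fun d word => if PySem.Str.len word = length then d.insert word (d.getD word 0 + 1) else d) (PySem.Dict.empty : PySem.Dict String Int)
      = (word_list.filter (fun w => decide (PySem.Str.len w = length))).foldl (fun d word => d.insert word (d.getD word 0 + 1)) PySem.Dict.empty :=
    pv_foldl_if_filter _ _ _ _
  rw [e1, e2]
  set l := word_list.filter (fun w => decide (PySem.Str.len w = length)) with hl
  rw [← PySem.Dict.counter_eq_foldl l, PySem.Dict.foldl_insert_getD_add_one_eq_counter l]
  set d := PySem.Dict.counter l with hd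
  have hitems : d.items = (PySem.Set.ofList l).map (fun k => (k, (l.count k : Int))) :=
    PySem.Dict.items_counter l
  by_cases hnil : l = []
  · have hv : d.items = [] := by rw [hitems, hnil]; rfl
    rw [hv]
    have hs : PySem.List.sorted ([] : List (String × Int)) (fun p => p.2) true = [] := by
      simp [PySem.List.sorted_eq_nil_iff]
    rw [hs]
    simp
  · -- nonempty case
    obtain ⟨w0, hw0⟩ := List.exists_mem_of_ne_nil l hnil
    have hne : d.items ≠ [] := by
      rw [hitems]
      intro hcon
      rw [List.map_eq_nil_iff] at hcon
      exact (List.ne_nil_of_mem ((PySem.Set.mem_ofList l w0).mpr hw0)) hcon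
    have hEmpty : d.items.isEmpty = false := by
      simpa [List.isEmpty_iff] using hne
    rw [if_neg (by simp [hEmpty])]
    -- the maximum count
    have hvals : d.values = d.items.map (·.2) := rfl
    have hvne : d.values ≠ [] := by
      rw [hvals]; simpa using hne
    obtain ⟨m, hm⟩ : ∃ m, PySem.List.max? d.values (fun v => v) = some m := by
      cases hmx : PySem.List.max? d.values (fun v => v) with
      | none => exact absurd ((PySem.List.max?_eq_none_iff _ _).mp hmx) hvne
      | some m => exact ⟨m, rfl⟩
    rw [hm]
    simp only [Option.getD_some]
    -- every count is in [1, m]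
    have hone : ∀ p ∈ d.items, 1 ≤ p.2 := by
      intro p hp
      rw [hitems] at hp
      obtain ⟨k, hk, hpk⟩ := List.mem_map.mp hp
      have : k ∈ l := (PySem.Set.mem_ofList l k).mp hk
      have : 1 ≤ l.count k := List.one_le_count_iff.mpr this
      subst hpk; simp; omega
    have hle : ∀ p ∈ d.items, p.2 ≤ m := by
      intro p hp
      exact PySem.List.max?_isMax hm p.2 (by rw [hvals]; exact List.mem_map_of_mem hp)
    have hm1 : 1 ≤ m := by
      have hmem := PySem.List.max?_mem hm
      rw [hvals] at hmem
      obtain ⟨p, hp, hpm⟩ := List.mem_map.mp hmem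
      have := hone p hp; omega
    -- the bucket list
    have hblen : ((PySem.List.pyRange 0 (m + 1) 1).map (fun _ => ([] : List String))).length
        = (m + 1).toNat := by
      rw [PySem.List.pyRange_of_pos 0 (m + 1) (by omega)]
      rw [if_pos (by omega)]
      simp
    have hblenI : (((PySem.List.pyRange 0 (m + 1) 1).map (fun _ => ([] : List String))).length : Int)
        = m + 1 := by rw [hblen]; omega
    have hbin : ∀ p ∈ d.items, 0 ≤ p.2 ∧ p.2 < (((PySem.List.pyRange 0 (m + 1) 1).map (fun _ => ([] : List String))).length : Int) := by
      intro p hp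
      rw [hblenI]
      exact ⟨by have := hone p hp; omega, by have := hle p hp; omega⟩
    obtain ⟨hbl, hbg⟩ := pv_buckets_foldl d.items _ hbin
    set buckets := d.items.foldl
        (fun bs p => PySem.List.pySetD bs p.2 (PySem.List.pyGetD bs p.2 [] ++ [p.1]))
        ((PySem.List.pyRange 0 (m + 1) 1).map (fun _ => ([] : List String))) with hbk
    have hinit : ∀ c : Int, 0 ≤ c → c < m + 1 →
        PySem.List.pyGetD ((PySem.List.pyRange 0 (m + 1) 1).map (fun _ => ([] : List String))) c [] = [] := by
      intro c hc0 hc1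
      rw [PySem.List.pyGetD_eq_getElem _ _ hc0 (by rw [hblenI]; exact hc1)]
      simp
    have hbucket : ∀ c : Int, 0 ≤ c → c < m + 1 →
        PySem.List.pyGetD buckets c [] = (d.items.filter (fun p => p.2 = c)).map (·.1) := by
      intro c hc0 hc1
      rw [hbk, hbg c hc0 (by rw [hblenI]; exact hc1), hinit c hc0 hc1]
      simp
    -- the emission loop over the descending range
    rw [pv_pyRange_down m, PySem.List.foldl_append_eq_flatMap]
    set K := (List.range m.toNat).map (fun k : Nat => m - (k : Int)) with hK
    have hKP : K.Pairwise (· > ·) := by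
      rw [hK]
      exact (List.pairwise_lt_range).map _ (by intro a b hab; omega)
    have hKmem : ∀ c : Int, c ∈ K ↔ 1 ≤ c ∧ c ≤ m := by
      intro c
      rw [hK]
      simp only [List.mem_map, List.mem_range]
      constructor
      · rintro ⟨k, hk, rfl⟩; omega
      · rintro ⟨h1, h2⟩
        exact ⟨(m - c).toNat, by omega, by omega⟩
    -- A's sort is the bucket concatenation
    have hsort : PySem.List.sorted d.items (fun p => p.2) true
        = K.flatMap (fun c => d.items.filter (fun p => p.2 = c)) := by
      apply pv_sortedRev_eq_flatMap (fun p => p.2) K hKP d.items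
      intro p hp
      exact (hKmem p.2).mpr ⟨hone p hp, hle p hp⟩
    rw [hsort]
    rw [List.nil_append, List.map_flatMap]
    apply List.flatMap_congr
    intro c hc
    have := (hKmem c).mp hc
    rw [hbucket c (by omega) (by omega)]
    rfl

-- ===== VERDICT (by name: the statement is the Claim_ definition above) =====
theorem get_word_order_spec : Claim_equal_get_word_order := by
  intro word_list length _
  unfold Spec_get_word_order
  exact pv_main word_list length
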